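-- pv_equiv track=rewrite | github.com/MJK88/adventofcode | 2024/day05.py | GetNewUpdate
-- ===== SOURCE A (Python) =====
-- def GetNewUpdate(update, pageOrdening):
--     newUpdate = ["."] * len(update)
--     for pageNumber in update:
--         allNumbersBefore = [
--             x[0] for x in pageOrdening if x[1] == pageNumber and x[0] in update
--         ]
--         newUpdate[len(allNumbersBefore)] = pageNumber
--
--     return newUpdate
-- ===== SOURCE B (Python) =====
-- def GetNewUpdate(update, pageOrdening):
--     # One pass over pageOrdening with a set + counter dict instead of
--     # rescanning pageOrdening (and update) for every page.
--     members = set(update)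
--     counts = {}
--     for x, y in pageOrdening:
--         if x in members:
--             counts[y] = counts.get(y, 0) + 1
--     newUpdate = ["."] * len(update)
--     for pageNumber in update:
--         newUpdate[counts.get(pageNumber, 0)] = pageNumber
--     return newUpdate
-- ===== Notes on version B (the rewrite author's own statement) =====
-- stated objective: faster
-- what changed: Instead of rescanning pageOrdening (with an O(n) list membership test inside) once per page, B makes one pass over pageOrdening with a set of update and a counter dict keyed by the rule's second element, then places each page at its precomputed count.
-- outside the precondition, e.g. on GetNewUpdate([1, 2], []): A returns [2, '.'], B returns [2, '.']; on GetNewUpdate([1], [(1, 1)]): A raises IndexError, B raises IndexError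
import Mathlib
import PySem

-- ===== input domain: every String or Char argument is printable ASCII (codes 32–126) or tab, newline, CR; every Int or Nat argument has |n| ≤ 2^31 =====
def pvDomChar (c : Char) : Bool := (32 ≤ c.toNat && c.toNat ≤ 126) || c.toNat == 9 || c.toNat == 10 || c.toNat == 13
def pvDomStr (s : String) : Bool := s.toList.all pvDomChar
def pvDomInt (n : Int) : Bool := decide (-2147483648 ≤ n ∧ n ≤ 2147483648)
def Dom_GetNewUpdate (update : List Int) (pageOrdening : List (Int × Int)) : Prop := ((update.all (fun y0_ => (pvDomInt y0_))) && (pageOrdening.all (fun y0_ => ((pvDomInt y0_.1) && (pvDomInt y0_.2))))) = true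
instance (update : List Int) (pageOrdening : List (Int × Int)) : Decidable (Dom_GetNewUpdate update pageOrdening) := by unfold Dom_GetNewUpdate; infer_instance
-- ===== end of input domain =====

-- B replaces A's per-page rescan of pageOrdening (with a list membership test inside)
-- by one counting pass over pageOrdening using a set of update and a counter dict; objective: faster.


-- ===== PORT A =====
-- Python's "." placeholder is modelled as `none`; under Pre_ every slot is overwritten,
-- so the final `.map (·.getD 0)` only strips `some`.
def GetNewUpdate (update : List Int) (pageOrdening : List (Int × Int)) : List Int :=
  let newUpdate : List (Option Int) := List.replicate update.length none
  (update.foldl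
    (fun acc pageNumber =>
      let allNumbersBefore :=
        (pageOrdening.filter (fun x => x.2 == pageNumber && update.contains x.1)).map Prod.fst
      PySem.List.pySetD acc (allNumbersBefore.length : Int) (some pageNumber))
    newUpdate).map (·.getD 0)

-- ===== PORT B =====
def GetNewUpdate_alt (update : List Int) (pageOrdening : List (Int × Int)) : List Int :=
  let members : PySem.Set Int := PySem.Set.ofList update
  let counts : PySem.Dict Int Int :=
    pageOrdening.foldl
      (fun d q => if members.contains q.1 then d.insert q.2 (d.getD q.2 0 + 1) else d)
      PySem.Dict.empty
  let newUpdate : List (Option Int) := List.replicate update.length none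
  (update.foldl
    (fun acc pageNumber => PySem.List.pySetD acc (counts.getD pageNumber 0) (some pageNumber))
    newUpdate).map (·.getD 0)

-- ===== PRECONDITION & SPEC =====
-- Pre_ excludes inputs where A raises IndexError (some page's predecessor count reaches
-- len(update)) and inputs where some slot is never written, on which A returns a list still
-- containing the string placeholder "." — not a list of ints (B returns the same).
def Pre_GetNewUpdate (update : List Int) (pageOrdening : List (Int × Int)) : Prop :=
  (∀ p ∈ update,
      (pageOrdening.filter (fun x => x.2 == p && update.contains x.1)).length < update.length) ∧
  (∀ i < update.length, ∃ p ∈ update,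
      (pageOrdening.filter (fun x => x.2 == p && update.contains x.1)).length = i)
instance (update : List Int) (pageOrdening : List (Int × Int)) : Decidable (Pre_GetNewUpdate update pageOrdening) := by unfold Pre_GetNewUpdate; infer_instance

def pvWitness_GetNewUpdate : List Int × (List (Int × Int)) :=
  ([75, 47, 61, 53, 29], [(47, 53), (75, 53), (61, 53), (47, 61), (75, 61), (47, 29), (75, 29), (61, 29), (53, 29), (75, 47)])

def Spec_GetNewUpdate (update : List Int) (pageOrdening : List (Int × Int)) (out : List Int) : Prop := out = GetNewUpdate_alt update pageOrdening
instance (update : List Int) (pageOrdening : List (Int × Int)) (out : List Int) : Decidable (Spec_GetNewUpdate update pageOrdening out) := by unfold Spec_GetNewUpdate; infer_instance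

-- ===== CLAIM (what is proved, stated in full; the proofs are below) =====
def Claim_equal_GetNewUpdate : Prop := ∀ (update : List Int) (pageOrdening : List (Int × Int)), Dom_GetNewUpdate update pageOrdening → Pre_GetNewUpdate update pageOrdening → Spec_GetNewUpdate update pageOrdening (GetNewUpdate update pageOrdening)

-- ===== LEMMAS AND PROOFS =====

-- a fold that skips elements failing c is the fold over the filtered list
lemma foldl_if_eq_foldl_filter {α β : Type} (l : List α) (c : α → Bool)
    (f : β → α → β) (d : β) :
    l.foldl (fun d q => if c q then f d q else d) d = (l.filter c).foldl f d := by
  induction l generalizing d with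
  | nil => rfl
  | cons a t ih => simp only [List.foldl_cons, List.filter_cons]; split <;> simp [ih]

-- B's counter lookup equals A's per-page predecessor count
lemma counts_getD (update : List Int) (pageOrdening : List (Int × Int)) (p : Int) :
    (pageOrdening.foldl
      (fun d q => if (PySem.Set.ofList update).contains q.1 then d.insert q.2 (d.getD q.2 0 + 1) else d)
      PySem.Dict.empty).getD p 0
    = ((pageOrdening.filter (fun x => x.2 == p && update.contains x.1)).length : Int) := by
  have hmem : ∀ q : Int × Int, (PySem.Set.ofList update).contains q.1 = update.contains q.1 := by
    intro q; simp [pysem]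
  simp only [hmem]
  rw [foldl_if_eq_foldl_filter]
  have h := PySem.Dict.getD_foldl_insert_add_one
    (l := (pageOrdening.filter (fun q => update.contains q.1)).map (·.2))
    (d := PySem.Dict.empty) (v := p)
  rw [List.foldl_map] at h
  rw [h]
  simp only [List.count, List.countP_map, ← List.countP_eq_length_filter, List.countP_filter]
  simp

-- ===== VERDICT (by name: the statement is the Claim_ definition above) =====
theorem GetNewUpdate_spec : Claim_equal_GetNewUpdate := by
  intro update pageOrdening _ _
  unfold Spec_GetNewUpdate
  simp only [GetNewUpdate, GetNewUpdate_alt]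
  congr 1
  have hfun : (fun (acc : List (Option Int)) (pageNumber : Int) =>
      PySem.List.pySetD acc
        ((((pageOrdening.filter (fun x => x.2 == pageNumber && update.contains x.1)).map Prod.fst).length : Int))
        (some pageNumber))
    = (fun (acc : List (Option Int)) (pageNumber : Int) =>
      PySem.List.pySetD acc
        ((pageOrdening.foldl
          (fun d q => if (PySem.Set.ofList update).contains q.1 then d.insert q.2 (d.getD q.2 0 + 1) else d)
          PySem.Dict.empty).getD pageNumber 0)
        (some pageNumber)) := by
    funext acc p
    rw [counts_getD]
    simp
  rw [hfun]
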